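-- pv_equiv track=rewrite | github.com/handuoZhang/Genetic-Algorithm-based-Online-Partitioning-BranchyNet-for-Accelearting-Edge-Inference | MutOper.py | positionToPartition
-- ===== SOURCE A (Python) =====
-- import copy
--
-- def positionToPartition(partition):
--     l2 = copy.deepcopy(partition)
--     result = list()
--     d = dict()
--     partition.sort()
--     for index,value in enumerate(partition):
--         d[value] = index
--     for i in l2:
--         result.append(d[i])
--     return result
-- ===== SOURCE B (Python) =====
-- def positionToPartition(partition):
--     # Rank by comparison counting: the last sorted index of x equals
--     # (#elements < x) + (#elements == x) - 1. No sort is used to compute ranks.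
--     result = []
--     for x in partition:
--         lt = 0
--         eq = 0
--         for y in partition:
--             if y < x:
--                 lt += 1
--             elif y == x:
--                 eq += 1
--         result.append(lt + eq - 1)
--     partition.sort()  # preserve A's in-place sort side effect
--     return result
-- ===== Notes on version B (the rewrite author's own statement) =====
-- stated objective: alternative
-- what changed: Replaces sort-then-enumerate-into-dict rank table by direct comparison counting: each element's rank is (#smaller)+(#equal)-1, computed with a nested counting loop and no index table; trades O(n log n) for O(n^2).
import Mathlib
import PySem

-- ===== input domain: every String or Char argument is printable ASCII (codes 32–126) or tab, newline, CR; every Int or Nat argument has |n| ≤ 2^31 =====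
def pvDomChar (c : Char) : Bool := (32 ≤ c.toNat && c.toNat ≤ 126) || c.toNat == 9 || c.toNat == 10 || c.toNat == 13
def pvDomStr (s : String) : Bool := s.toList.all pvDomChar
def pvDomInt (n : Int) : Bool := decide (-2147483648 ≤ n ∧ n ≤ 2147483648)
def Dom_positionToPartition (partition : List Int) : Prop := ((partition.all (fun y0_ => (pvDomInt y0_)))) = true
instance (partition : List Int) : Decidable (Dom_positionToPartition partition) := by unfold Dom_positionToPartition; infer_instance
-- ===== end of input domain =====

-- ===== PORT A =====
-- Header: B computes each rank by comparison counting ((#smaller)+(#equal)-1) instead of A's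
-- sort-then-enumerate dict table (objective: alternative). Both Pythons sort `partition` in
-- place; the equivalence proved here is about the return value.
-- Port of A. d[i] in A's second loop never raises KeyError (every i of l2 is in the sorted
-- list, hence a key of d), so the lookup is ported as getD with an arbitrary default.
def positionToPartition (partition : List Int) : List Int :=
  let l2 := partition
  let sortedp := PySem.List.sorted partition (fun x => x) false
  let d := (PySem.List.enumerate sortedp 0).foldl
             (fun d p => d.insert p.2 p.1) PySem.Dict.empty
  l2.foldl (fun result i => result ++ [d.getD i 0]) []

-- ===== PORT B =====
def positionToPartition_alt (partition : List Int) : List Int :=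
  partition.foldl (fun result x =>
    let c := partition.foldl (fun (p : Int × Int) y =>
      if y < x then (p.1 + 1, p.2) else if y = x then (p.1, p.2 + 1) else p) (0, 0)
    result ++ [c.1 + c.2 - 1]) []

-- ===== PRECONDITION & SPEC =====
def Spec_positionToPartition (partition : List Int) (out : List Int) : Prop := out = positionToPartition_alt partition
instance (partition : List Int) (out : List Int) : Decidable (Spec_positionToPartition partition out) := by unfold Spec_positionToPartition; infer_instance

-- ===== CLAIM (what is proved, stated in full; the proofs are below) =====
def Claim_equal_positionToPartition : Prop := ∀ (partition : List Int), Dom_positionToPartition partition → Spec_positionToPartition partition (positionToPartition partition)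

-- ===== LEMMAS AND PROOFS =====

-- bisectRight is the unique index with the bisect_right bracketing property on a sorted list
lemma bisectRight_eq_of (l : List Int) (x : Int) (hs : l.Pairwise (· ≤ ·)) (k : Nat)
    (hk : k ≤ l.length)
    (h1 : ∀ j (hj : j < l.length), j < k → l[j] ≤ x)
    (h2 : ∀ j (hj : j < l.length), k ≤ j → x < l[j]) :
    PySem.List.bisectRight l x = k := by
  obtain ⟨hn, hn1, hn2⟩ := PySem.List.bisectRight_spec l x hs
  set n := PySem.List.bisectRight l x with hdef
  rcases lt_trichotomy n k with h | h | h
  · have hlt : n < l.length := lt_of_lt_of_le h hk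
    have := h1 n hlt h
    have := hn2 n hlt le_rfl
    omega
  · exact h
  · have hlt : k < l.length := lt_of_lt_of_le h hn
    have := hn1 k hlt h
    have := h2 k hlt le_rfl
    omega

-- the dict built by A's first loop maps each member of the sorted list to bisect_right - 1
lemma dict_getD_eq (s : List Int) (hs : s.Pairwise (· ≤ ·)) :
    ∀ x ∈ s,
    ((PySem.List.enumerate s 0).foldl (fun d p => d.insert p.2 p.1)
        (PySem.Dict.empty : PySem.Dict Int Int)).getD x 0
      = (PySem.List.bisectRight s x : Int) - 1 := by
  induction s using List.reverseRecOn with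
  | nil => intro x hx; cases hx
  | append_singleton s a ih =>
    rw [List.pairwise_append] at hs
    obtain ⟨hps, -, hall⟩ := hs
    have hle : ∀ y ∈ s, y ≤ a := fun y hy => hall y hy a (List.mem_singleton_self a)
    intro x hx
    rw [PySem.List.enumerate_append, List.foldl_append]
    simp only [PySem.List.enumerate_cons, PySem.List.enumerate_nil, List.foldl_cons,
      List.foldl_nil]
    by_cases hxa : x = a
    · subst hxa
      rw [PySem.Dict.getD_insert_self]
      have hb : PySem.List.bisectRight (s ++ [x]) x = s.length + 1 := by
        apply bisectRight_eq_of _ _ (by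
          rw [List.pairwise_append]
          exact ⟨hps, List.pairwise_singleton _ _, hall⟩)
        · simp
        · intro j hj _
          simp only [List.length_append, List.length_singleton] at hj
          rcases Nat.lt_or_ge j s.length with h | h
          · rw [List.getElem_append_left h]
            exact hle _ (List.getElem_mem h)
          · have : j = s.length := by omega
            subst this
            simp
        · intro j hj hk
          simp only [List.length_append, List.length_singleton] at hj
          omega
      rw [hb]
      push_cast
      ring
    · rw [PySem.Dict.getD_insert_of_ne _ _ _ hxa]
      have hxs : x ∈ s := by
        rcases List.mem_append.mp hx with h | h
        · exact h
        · exact absurd (List.mem_singleton.mp h) hxa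
      have hxa' : x < a := lt_of_le_of_ne (hle x hxs) hxa
      rw [ih hps x hxs]
      congr 2
      obtain ⟨hn, hn1, hn2⟩ := PySem.List.bisectRight_spec s x hps
      symm
      apply bisectRight_eq_of _ _ (by
        rw [List.pairwise_append]
        exact ⟨hps, List.pairwise_singleton _ _, hall⟩)
      · simp; omega
      · intro j hj hk
        have hj' : j < s.length := lt_of_lt_of_le hk hn
        rw [List.getElem_append_left hj']
        exact hn1 j hj' hk
      · intro j hj hk
        simp only [List.length_append, List.length_singleton] at hj
        rcases Nat.lt_or_ge j s.length with h | h
        · rw [List.getElem_append_left h]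
          exact hn2 j h hk
        · have : j = s.length := by omega
          subst this
          simpa using hxa'

-- on a sorted list, the elements ≤ x are exactly an initial segment of length countP (≤ x)
lemma countP_prefix (s : List Int) (x : Int) (hs : s.Pairwise (· ≤ ·)) :
    ∀ j (hj : j < s.length), (s[j] ≤ x ↔ j < s.countP (fun y => decide (y ≤ x))) := by
  induction s with
  | nil => intro j hj; cases hj
  | cons a t ih =>
    rw [List.pairwise_cons] at hs
    obtain ⟨ha, ht⟩ := hs
    intro j hj
    by_cases hax : a ≤ x
    · cases j with
      | zero => simp [hax]
      | succ j =>
        have := ih ht j (by simpa using hj)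
        simp only [List.getElem_cons_succ]
        rw [this]
        simp [hax]
    · have ht0 : t.countP (fun y => decide (y ≤ x)) = 0 := by
        rw [List.countP_eq_zero]
        intro y hy
        have := ha y hy
        simp only [decide_eq_true_eq]
        omega
      have : (a :: t).countP (fun y => decide (y ≤ x)) = 0 := by
        simp [hax, ht0]
      rw [this]
      constructor
      · intro hle
        exfalso
        cases j with
        | zero => exact hax (by simpa using hle)
        | succ j =>
          have := ha _ (List.getElem_mem (l := t) (by simpa using hj))
          simp only [List.getElem_cons_succ] at hle
          omega
      · intro h; cases h
  
-- bisect_right on a sorted list counts the elements ≤ x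
lemma bisectRight_eq_countP (s : List Int) (x : Int) (hs : s.Pairwise (· ≤ ·)) :
    PySem.List.bisectRight s x = s.countP (fun y => decide (y ≤ x)) := by
  apply bisectRight_eq_of _ _ hs
  · exact List.countP_le_length
  · intro j hj hk
    exact (countP_prefix s x hs j hj).mpr hk
  · intro j hj hk
    have := (countP_prefix s x hs j hj)
    by_contra h
    exact absurd ((this).mp (by omega)) (by omega)

-- B's inner loop computes (countP (< x), countP (= x)) on top of its initial accumulator
lemma inner_fold_eq (x : Int) (l : List Int) : ∀ (p : Int × Int),
    l.foldl (fun (p : Int × Int) y =>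
      if y < x then (p.1 + 1, p.2) else if y = x then (p.1, p.2 + 1) else p) p
    = (p.1 + l.countP (fun y => decide (y < x)), p.2 + l.countP (fun y => decide (y = x))) := by
  induction l with
  | nil => intro p; simp
  | cons a t ih =>
    intro p
    simp only [List.foldl_cons, List.countP_cons]
    rcases lt_trichotomy a x with h1 | h1 | h1
    · rw [if_pos h1, ih]
      have h2 : ¬ a = x := by omega
      simp only [h1, h2, decide_true, decide_false, if_true, Prod.mk.injEq]
      constructor <;> push_cast <;> ring
    · rw [if_neg (by omega), if_pos h1, ih]
      subst h1
      simp only [lt_irrefl, decide_true, decide_false, if_true, Prod.mk.injEq]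
      constructor <;> push_cast <;> ring
    · rw [if_neg (by omega), if_neg (by omega), ih]
      have h2 : ¬ a = x := by omega
      have h3 : ¬ a < x := by omega
      simp [h2, h3]

-- splitting countP (≤ x) into strict and equal parts
lemma countP_le_split (l : List Int) (x : Int) :
    l.countP (fun y => decide (y ≤ x))
      = l.countP (fun y => decide (y < x)) + l.countP (fun y => decide (y = x)) := by
  induction l with
  | nil => simp
  | cons a t ih =>
    simp only [List.countP_cons]
    rcases lt_trichotomy a x with h1 | h1 | h1
    · have h2 : ¬ a = x := by omega
      have h4 : a ≤ x := by omega
      simp [h1, h2, h4, ih]; omega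
    · have h3 : ¬ a < x := by omega
      have h4 : a ≤ x := by omega
      simp [h1, ih]; omega
    · have h2 : ¬ a = x := by omega
      have h3 : ¬ a < x := by omega
      have h4 : ¬ a ≤ x := by omega
      simp [h2, h3, h4, ih]

-- ===== VERDICT (by name: the statement is the Claim_ definition above) =====
theorem positionToPartition_spec : Claim_equal_positionToPartition := by
  intro partition _
  unfold Spec_positionToPartition positionToPartition positionToPartition_alt
  simp only
  rw [PySem.List.foldl_append_singleton_eq_map, PySem.List.foldl_append_singleton_eq_map]
  apply List.map_congr_left
  intro x hx
  have hpair : (PySem.List.sorted partition (fun x => x) false).Pairwise (· ≤ ·) := by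
    simpa using PySem.List.sorted_pairwise partition (fun x => x)
  have hmem : x ∈ PySem.List.sorted partition (fun x => x) false :=
    (PySem.List.mem_sorted _ _ _ _).mpr hx
  rw [dict_getD_eq _ hpair x hmem, inner_fold_eq]
  have hperm : (PySem.List.sorted partition (fun x => x) false).Perm partition :=
    PySem.List.sorted_perm _ _ _
  rw [bisectRight_eq_countP _ _ hpair, hperm.countP_eq]
  rw [countP_le_split]
  push_cast
  ring
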